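-- pv_equiv track=rewrite | github.com/madhavms/Python_Digital_Programs | Mock_Find_Coordinate.py | find_coordinate
-- ===== SOURCE A (Python) =====
-- def find_coordinate(n):
--     x, y = 0, 0
--     c = 'R'
--     distance = 10
--     while n > 0:
--         if c == 'R':
--             x = x + distance
--             distance += 10
--             c = 'U'
--             n -= 1
--         elif c == 'U':
--             y = y + distance
--             distance += 10
--             c = 'L'
--             n -= 1
--         elif c == 'L':
--             x = x - distance
--             distance += 10
--             c = 'D'
--             n -= 1
--         elif c == 'D':
--             y = y - distance
--             distance += 10
--             c = 'A'
--             n -= 1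
--         else:
--             x = x + distance
--             distance += 10
--             c = 'R'
--             n -= 1
--
--     return [x, y]
-- ===== SOURCE B (Python) =====
-- def find_coordinate(n):
--     # Closed form: step i (0-based) moves distance 10*(i+1) in direction cycle
--     # R,U,L,D,diag-x of period 5; sum each residue class as an arithmetic series.
--     if n <= 0:
--         return [0, 0]
--     q, r = divmod(n, 5)
--     def s(c):
--         m = q + (1 if r > c else 0)
--         return 10 * m * (c + 1) + 25 * m * (m - 1)
--     return [s(0) - s(2) + s(4), s(1) - s(3)]
-- ===== Notes on version B (the rewrite author's own statement) =====
-- stated objective: faster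
-- what changed: Replaced the step-by-step simulation loop over a 5-state direction machine by a closed-form arithmetic-series sum per step-index residue class mod 5.
import Mathlib
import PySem

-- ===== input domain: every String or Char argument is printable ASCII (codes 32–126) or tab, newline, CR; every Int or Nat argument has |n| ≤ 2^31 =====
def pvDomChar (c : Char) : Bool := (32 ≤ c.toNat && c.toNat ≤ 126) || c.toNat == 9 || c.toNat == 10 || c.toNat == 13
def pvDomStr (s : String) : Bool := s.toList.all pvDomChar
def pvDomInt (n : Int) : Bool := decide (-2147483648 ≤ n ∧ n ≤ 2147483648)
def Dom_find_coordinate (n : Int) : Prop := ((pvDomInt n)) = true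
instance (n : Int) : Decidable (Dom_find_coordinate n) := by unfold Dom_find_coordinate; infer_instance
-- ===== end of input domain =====

-- B replaces A's O(n) step-by-step direction-machine simulation by a closed-form
-- arithmetic-series sum per step-index residue class mod 5 (objective: faster).

-- ===== PORT A =====
-- the while loop of A: fuel = remaining iterations (A's loop runs exactly max n 0 times,
-- decrementing n by 1 in every branch)
def find_coordinate_loop : Nat → Int → Int → Int → Char → Int × Int
  | 0, x, y, _, _ => (x, y)
  | Nat.succ k, x, y, d, c =>
    if c = 'R' then find_coordinate_loop k (x + d) y (d + 10) 'U'
    else if c = 'U' then find_coordinate_loop k x (y + d) (d + 10) 'L'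
    else if c = 'L' then find_coordinate_loop k (x - d) y (d + 10) 'D'
    else if c = 'D' then find_coordinate_loop k x (y - d) (d + 10) 'A'
    else find_coordinate_loop k (x + d) y (d + 10) 'R'

def find_coordinate (n : Int) : List Int :=
  let p := find_coordinate_loop n.toNat 0 0 10 'R'
  [p.1, p.2]

-- ===== PORT B =====
-- Source B's helper s(c): the m-term arithmetic series for residue class c
def find_coordinate_s (q r : Int) (c : Int) : Int :=
  let m : Int := q + (if r > c then 1 else 0)
  10 * m * (c + 1) + 25 * m * (m - 1)

def find_coordinate_alt (n : Int) : List Int :=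
  if n ≤ 0 then [0, 0]
  else
    let q := PySem.Int.floordiv n 5
    let r := PySem.Int.mod n 5
    [find_coordinate_s q r 0 - find_coordinate_s q r 2 + find_coordinate_s q r 4,
     find_coordinate_s q r 1 - find_coordinate_s q r 3]

-- ===== PRECONDITION & SPEC =====
def Spec_find_coordinate (n : Int) (out : List Int) : Prop := out = find_coordinate_alt n
instance (n : Int) (out : List Int) : Decidable (Spec_find_coordinate n out) := by unfold Spec_find_coordinate; infer_instance

-- ===== CLAIM (what is proved, stated in full; the proofs are below) =====
def Claim_equal_find_coordinate : Prop := ∀ (n : Int), Dom_find_coordinate n → Spec_find_coordinate n (find_coordinate n)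

-- ===== LEMMAS AND PROOFS =====

-- number of step indices i < n with i % 5 = c (for c < 5)
def mcount (n c : Nat) : Nat := n / 5 + (if c < n % 5 then 1 else 0)

-- closed-form series sum for residue class c over the first n steps
def sclosed (n c : Nat) : Int :=
  10 * (mcount n c : Int) * ((c : Int) + 1) + 25 * (mcount n c : Int) * ((mcount n c : Int) - 1)

def SX (n : Nat) : Int := sclosed n 0 - sclosed n 2 + sclosed n 4
def SY (n : Nat) : Int := sclosed n 1 - sclosed n 3

def dirOf (r : Nat) : Char :=
  if r = 0 then 'R' else if r = 1 then 'U' else if r = 2 then 'L'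
  else if r = 3 then 'D' else 'A'

lemma sclosed_step (t c : Nat) (hc : c < 5) :
    sclosed (t + 1) c = sclosed t c + (if t % 5 = c then 10 * ((t : Int) + 1) else 0) := by
  by_cases h : t % 5 = c
  · have hmc : mcount (t + 1) c = mcount t c + 1 := by unfold mcount; split_ifs <;> omega
    have hm5 : mcount t c = t / 5 := by unfold mcount; rw [if_neg (by omega)]; omega
    have htm : (t : Int) = 5 * (mcount t c : Int) + (c : Int) := by rw [hm5]; omega
    unfold sclosed
    rw [hmc, if_pos h]
    push_cast
    rw [htm]; ring
  · have hmc : mcount (t + 1) c = mcount t c := by unfold mcount; split_ifs <;> omega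
    unfold sclosed
    rw [hmc, if_neg h]; ring

lemma loop_closed (k : Nat) : ∀ (t : Nat) (x y : Int),
    find_coordinate_loop k x y (10 * ((t : Int) + 1)) (dirOf (t % 5))
      = (x + (SX (t + k) - SX t), y + (SY (t + k) - SY t)) := by
  induction k with
  | zero => intro t x y; simp [find_coordinate_loop]
  | succ k ih =>
    intro t x y
    have hd : (10 : Int) * ((t : Int) + 1) + 10 = 10 * (((t + 1 : Nat) : Int) + 1) := by
      push_cast; ring
    have step : ∀ (x' y' : Int) (c : Char), c = dirOf ((t + 1) % 5) →
        find_coordinate_loop k x' y' (10 * ((t : Int) + 1) + 10) c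
          = (x' + (SX (t + 1 + k) - SX (t + 1)), y' + (SY (t + 1 + k) - SY (t + 1))) := by
      intro x' y' c hc; rw [hd, hc]; exact ih (t + 1) x' y'
    have hX : SX (t + 1) = SX t + (if t % 5 = 0 then 10 * ((t:Int)+1) else 0)
        - (if t % 5 = 2 then 10 * ((t:Int)+1) else 0)
        + (if t % 5 = 4 then 10 * ((t:Int)+1) else 0) := by
      unfold SX
      rw [sclosed_step t 0 (by norm_num), sclosed_step t 2 (by norm_num),
          sclosed_step t 4 (by norm_num)]
      ring
    have hY : SY (t + 1) = SY t + (if t % 5 = 1 then 10 * ((t:Int)+1) else 0)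
        - (if t % 5 = 3 then 10 * ((t:Int)+1) else 0) := by
      unfold SY
      rw [sclosed_step t 1 (by norm_num), sclosed_step t 3 (by norm_num)]
      ring
    have hcase : t % 5 = 0 ∨ t % 5 = 1 ∨ t % 5 = 2 ∨ t % 5 = 3 ∨ t % 5 = 4 := by omega
    rcases hcase with hm | hm | hm | hm | hm
    · rw [hm] at hX hY ⊢
      norm_num at hX hY
      have hn : (t + 1) % 5 = 1 := by omega
      show find_coordinate_loop (k+1) x y (10 * ((t : Int) + 1)) 'R' = _
      simp only [find_coordinate_loop, Char.reduceEq, reduceIte]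
      rw [step (x + 10 * ((t:Int) + 1)) (y) 'U' (by rw [hn]; rfl)]
      rw [show t + 1 + k = t + (k + 1) from by omega, hX, hY]
      refine Prod.ext ?_ ?_ <;> push_cast <;> ring
    · rw [hm] at hX hY ⊢
      norm_num at hX hY
      have hn : (t + 1) % 5 = 2 := by omega
      show find_coordinate_loop (k+1) x y (10 * ((t : Int) + 1)) 'U' = _
      simp only [find_coordinate_loop, Char.reduceEq, reduceIte]
      rw [step (x) (y + 10 * ((t:Int) + 1)) 'L' (by rw [hn]; rfl)]
      rw [show t + 1 + k = t + (k + 1) from by omega, hX, hY]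
      refine Prod.ext ?_ ?_ <;> push_cast <;> ring
    · rw [hm] at hX hY ⊢
      norm_num at hX hY
      have hn : (t + 1) % 5 = 3 := by omega
      show find_coordinate_loop (k+1) x y (10 * ((t : Int) + 1)) 'L' = _
      simp only [find_coordinate_loop, Char.reduceEq, reduceIte]
      rw [step (x - 10 * ((t:Int) + 1)) (y) 'D' (by rw [hn]; rfl)]
      rw [show t + 1 + k = t + (k + 1) from by omega, hX, hY]
      refine Prod.ext ?_ ?_ <;> push_cast <;> ring
    · rw [hm] at hX hY ⊢
      norm_num at hX hY
      have hn : (t + 1) % 5 = 4 := by omega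
      show find_coordinate_loop (k+1) x y (10 * ((t : Int) + 1)) 'D' = _
      simp only [find_coordinate_loop, Char.reduceEq, reduceIte]
      rw [step (x) (y - 10 * ((t:Int) + 1)) 'A' (by rw [hn]; rfl)]
      rw [show t + 1 + k = t + (k + 1) from by omega, hX, hY]
      refine Prod.ext ?_ ?_ <;> push_cast <;> ring
    · rw [hm] at hX hY ⊢
      norm_num at hX hY
      have hn : (t + 1) % 5 = 0 := by omega
      show find_coordinate_loop (k+1) x y (10 * ((t : Int) + 1)) 'A' = _
      simp only [find_coordinate_loop, Char.reduceEq, reduceIte]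
      rw [step (x + 10 * ((t:Int) + 1)) (y) 'R' (by rw [hn]; rfl)]
      rw [show t + 1 + k = t + (k + 1) from by omega, hX, hY]
      refine Prod.ext ?_ ?_ <;> push_cast <;> ring

lemma SX_zero : SX 0 = 0 := by decide
lemma SY_zero : SY 0 = 0 := by decide

lemma s_eq (n : Int) (hn : ¬ n ≤ 0) (c : Nat) :
    find_coordinate_s (PySem.Int.floordiv n 5) (PySem.Int.mod n 5) ((c : Nat) : Int)
      = sclosed n.toNat c := by
  rw [PySem.Int.floordiv_eq_ediv_of_pos (by omega), PySem.Int.mod_eq_emod_of_pos (by omega)]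
  unfold find_coordinate_s sclosed
  have hq : n / 5 = ((n.toNat / 5 : Nat) : Int) := by omega
  have hr : n % 5 = ((n.toNat % 5 : Nat) : Int) := by omega
  have hif : (if (n % 5 > (c : Int)) then (1:Int) else 0)
      = ((if c < n.toNat % 5 then (1:Nat) else 0 : Nat) : Int) := by
    rw [hr]; split_ifs with h1 h2 <;> first | rfl | (exfalso; omega)
  rw [hif, hq]
  unfold mcount
  push_cast
  ring

-- ===== VERDICT (by name: the statement is the Claim_ definition above) =====
theorem find_coordinate_spec : Claim_equal_find_coordinate := by
  intro n _
  unfold Spec_find_coordinate find_coordinate find_coordinate_alt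
  by_cases hn : n ≤ 0
  · have h0 : n.toNat = 0 := by omega
    simp [h0, find_coordinate_loop, hn]
  · simp only [if_neg hn]
    have hloop := loop_closed n.toNat 0 0 0
    norm_num [dirOf, SX_zero, SY_zero] at hloop
    rw [hloop]
    have e0 := s_eq n hn 0
    have e1 := s_eq n hn 1
    have e2 := s_eq n hn 2
    have e3 := s_eq n hn 3
    have e4 := s_eq n hn 4
    push_cast at e0 e1 e2 e3 e4
    rw [e0, e1, e2, e3, e4]
    simp [SX, SY]
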